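-- pv_equiv track=rewrite | github.com/jchromik/tuk2-exercise1 | task2/co-occurrence_per_code_range.py | prefix_to_range
-- ===== SOURCE A (Python) =====
-- def prefix_to_range(icd9prefix):
--     # see: https://en.wikipedia.org/wiki/List_of_ICD-9_codes for named ranges
--     if "E" in icd9prefix.upper():
--         return 18
--     if "V" in icd9prefix.upper():
--         return 19
--     range_starts = [
--         1, 140, 240, 280, 290, 320, 390, 460, 520, 580, 630, 680, 710, 740,
--         760, 780, 800]
--     try:
--         numeric_prefix = int(icd9prefix)
--     except ValueError:
--         return 0
--     for i in range(0,len(range_starts)):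
--         if range_starts[i] > numeric_prefix:
--             return i
--     return len(range_starts)
-- ===== SOURCE B (Python) =====
-- def prefix_to_range(icd9prefix):
--     up = icd9prefix.upper()
--     if "E" in up:
--         return 18
--     if "V" in up:
--         return 19
--     range_starts = [
--         1, 140, 240, 280, 290, 320, 390, 460, 520, 580, 630, 680, 710, 740,
--         760, 780, 800]
--     try:
--         n = int(icd9prefix)
--     except ValueError:
--         return 0
--     # bisect_right by hand: first index whose start strictly exceeds n
--     lo, hi = 0, len(range_starts)
--     while lo < hi:
--         mid = (lo + hi) // 2
--         if n < range_starts[mid]: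
--             hi = mid
--         else:
--             lo = mid + 1
--     return lo
-- ===== Notes on version B (the rewrite author's own statement) =====
-- stated objective: alternative
-- what changed: The linear scan over the 17 range starts is replaced by a hand-written bisect_right binary search (while lo < hi halving loop); the E/V guards and the int-parse with ValueError->0 are kept.
import Mathlib
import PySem

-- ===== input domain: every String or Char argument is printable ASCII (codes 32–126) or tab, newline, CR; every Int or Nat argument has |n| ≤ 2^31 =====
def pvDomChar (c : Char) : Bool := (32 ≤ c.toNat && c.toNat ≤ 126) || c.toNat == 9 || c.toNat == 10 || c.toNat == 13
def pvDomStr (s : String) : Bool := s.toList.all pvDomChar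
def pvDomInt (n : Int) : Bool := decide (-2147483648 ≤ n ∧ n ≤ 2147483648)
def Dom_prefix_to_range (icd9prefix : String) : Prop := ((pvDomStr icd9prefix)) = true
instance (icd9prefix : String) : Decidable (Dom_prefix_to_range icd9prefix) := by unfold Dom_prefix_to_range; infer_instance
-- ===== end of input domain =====

-- B replaces A's linear scan over the 17 range starts by a hand-written binary search
-- (bisect_right); objective: alternative (same guards and int-parse, different lookup algorithm).


-- ===== PORT A =====
def pvRangeStarts : List Int :=
  [1, 140, 240, 280, 290, 320, 390, 460, 520, 580, 630, 680, 710, 740, 760, 780, 800]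

-- A's for-loop: return the index of the first start > n, else len(range_starts)
def pvScanA : List Int → Int → Int → Int
  | [], i, _ => i
  | r :: rest, i, n => if r > n then i else pvScanA rest (i + 1) n

def prefix_to_range (icd9prefix : String) : Int :=
  if PySem.Str.isIn "E" (PySem.Str.upper icd9prefix) then 18
  else if PySem.Str.isIn "V" (PySem.Str.upper icd9prefix) then 19
  else
    match PySem.Int.ofStr? icd9prefix with
    | none => 0
    | some n => pvScanA pvRangeStarts 0 n

-- ===== PORT B =====
-- B's while-loop binary search (bisect_right); fuel 6 ≥ the number of iterations (hi - lo halves each step from 17)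
def pvBisectB (xs : List Int) (x : Int) : Nat → Nat → Nat → Nat
  | 0, lo, _ => lo
  | fuel + 1, lo, hi =>
    if lo < hi then
      let mid := (lo + hi) / 2
      if x < xs.getD mid 0 then pvBisectB xs x fuel lo mid
      else pvBisectB xs x fuel (mid + 1) hi
    else lo

-- Source B binds up = icd9prefix.upper() once; upper is pure, so the port writes it inline
def prefix_to_range_alt (icd9prefix : String) : Int :=
  if PySem.Str.isIn "E" (PySem.Str.upper icd9prefix) then 18
  else if PySem.Str.isIn "V" (PySem.Str.upper icd9prefix) then 19
  else
    match PySem.Int.ofStr? icd9prefix with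
    | none => 0
    | some n => ((pvBisectB pvRangeStarts n 6 0 17 : Nat) : Int)

-- ===== PRECONDITION & SPEC =====
def Spec_prefix_to_range (icd9prefix : String) (out : Int) : Prop := out = prefix_to_range_alt icd9prefix
instance (icd9prefix : String) (out : Int) : Decidable (Spec_prefix_to_range icd9prefix out) := by unfold Spec_prefix_to_range; infer_instance

-- ===== CLAIM (what is proved, stated in full; the proofs are below) =====
def Claim_equal_prefix_to_range : Prop := ∀ (icd9prefix : String), Dom_prefix_to_range icd9prefix → Spec_prefix_to_range icd9prefix (prefix_to_range icd9prefix)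

-- ===== LEMMAS AND PROOFS =====
set_option maxHeartbeats 1000000 in
lemma pv_scan_eq_bisect (n : Int) :
    pvScanA pvRangeStarts 0 n = ((pvBisectB pvRangeStarts n 6 0 17 : Nat) : Int) := by
  by_cases h0 : n < 1
  · simp [pvBisectB, pvScanA, pvRangeStarts, (show n < 1 by omega), (show n < 140 by omega), (show n < 240 by omega), (show n < 290 by omega), (show n < 520 by omega)]
  by_cases h1 : n < 140
  · simp [pvBisectB, pvScanA, pvRangeStarts, (show ¬ n < 1 by omega), (show n < 140 by omega), (show n < 240 by omega), (show n < 290 by omega), (show n < 520 by omega)]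
  by_cases h2 : n < 240
  · simp [pvBisectB, pvScanA, pvRangeStarts, (show ¬ n < 1 by omega), (show ¬ n < 140 by omega), (show n < 240 by omega), (show n < 290 by omega), (show n < 520 by omega)]
  by_cases h3 : n < 280
  · simp [pvBisectB, pvScanA, pvRangeStarts, (show ¬ n < 1 by omega), (show ¬ n < 140 by omega), (show ¬ n < 240 by omega), (show n < 280 by omega), (show n < 290 by omega), (show n < 520 by omega)]
  by_cases h4 : n < 290
  · simp [pvBisectB, pvScanA, pvRangeStarts, (show ¬ n < 1 by omega), (show ¬ n < 140 by omega), (show ¬ n < 240 by omega), (show ¬ n < 280 by omega), (show n < 290 by omega), (show n < 520 by omega)]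
  by_cases h5 : n < 320
  · simp [pvBisectB, pvScanA, pvRangeStarts, (show ¬ n < 1 by omega), (show ¬ n < 140 by omega), (show ¬ n < 240 by omega), (show ¬ n < 280 by omega), (show ¬ n < 290 by omega), (show n < 320 by omega), (show n < 390 by omega), (show n < 520 by omega)]
  by_cases h6 : n < 390
  · simp [pvBisectB, pvScanA, pvRangeStarts, (show ¬ n < 1 by omega), (show ¬ n < 140 by omega), (show ¬ n < 240 by omega), (show ¬ n < 280 by omega), (show ¬ n < 290 by omega), (show ¬ n < 320 by omega), (show n < 390 by omega), (show n < 520 by omega)]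
  by_cases h7 : n < 460
  · simp [pvBisectB, pvScanA, pvRangeStarts, (show ¬ n < 1 by omega), (show ¬ n < 140 by omega), (show ¬ n < 240 by omega), (show ¬ n < 280 by omega), (show ¬ n < 290 by omega), (show ¬ n < 320 by omega), (show ¬ n < 390 by omega), (show n < 460 by omega), (show n < 520 by omega)]
  by_cases h8 : n < 520
  · simp [pvBisectB, pvScanA, pvRangeStarts, (show ¬ n < 1 by omega), (show ¬ n < 140 by omega), (show ¬ n < 240 by omega), (show ¬ n < 280 by omega), (show ¬ n < 290 by omega), (show ¬ n < 320 by omega), (show ¬ n < 390 by omega), (show ¬ n < 460 by omega), (show n < 520 by omega)]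
  by_cases h9 : n < 580
  · simp [pvBisectB, pvScanA, pvRangeStarts, (show ¬ n < 1 by omega), (show ¬ n < 140 by omega), (show ¬ n < 240 by omega), (show ¬ n < 280 by omega), (show ¬ n < 290 by omega), (show ¬ n < 320 by omega), (show ¬ n < 390 by omega), (show ¬ n < 460 by omega), (show ¬ n < 520 by omega), (show n < 580 by omega), (show n < 630 by omega), (show n < 680 by omega), (show n < 740 by omega)]
  by_cases h10 : n < 630
  · simp [pvBisectB, pvScanA, pvRangeStarts, (show ¬ n < 1 by omega), (show ¬ n < 140 by omega), (show ¬ n < 240 by omega), (show ¬ n < 280 by omega), (show ¬ n < 290 by omega), (show ¬ n < 320 by omega), (show ¬ n < 390 by omega), (show ¬ n < 460 by omega), (show ¬ n < 520 by omega), (show ¬ n < 580 by omega), (show n < 630 by omega), (show n < 680 by omega), (show n < 740 by omega)]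
  by_cases h11 : n < 680
  · simp [pvBisectB, pvScanA, pvRangeStarts, (show ¬ n < 1 by omega), (show ¬ n < 140 by omega), (show ¬ n < 240 by omega), (show ¬ n < 280 by omega), (show ¬ n < 290 by omega), (show ¬ n < 320 by omega), (show ¬ n < 390 by omega), (show ¬ n < 460 by omega), (show ¬ n < 520 by omega), (show ¬ n < 580 by omega), (show ¬ n < 630 by omega), (show n < 680 by omega), (show n < 740 by omega)]
  by_cases h12 : n < 710
  · simp [pvBisectB, pvScanA, pvRangeStarts, (show ¬ n < 1 by omega), (show ¬ n < 140 by omega), (show ¬ n < 240 by omega), (show ¬ n < 280 by omega), (show ¬ n < 290 by omega), (show ¬ n < 320 by omega), (show ¬ n < 390 by omega), (show ¬ n < 460 by omega), (show ¬ n < 520 by omega), (show ¬ n < 580 by omega), (show ¬ n < 630 by omega), (show ¬ n < 680 by omega), (show n < 710 by omega), (show n < 740 by omega)]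
  by_cases h13 : n < 740
  · simp [pvBisectB, pvScanA, pvRangeStarts, (show ¬ n < 1 by omega), (show ¬ n < 140 by omega), (show ¬ n < 240 by omega), (show ¬ n < 280 by omega), (show ¬ n < 290 by omega), (show ¬ n < 320 by omega), (show ¬ n < 390 by omega), (show ¬ n < 460 by omega), (show ¬ n < 520 by omega), (show ¬ n < 580 by omega), (show ¬ n < 630 by omega), (show ¬ n < 680 by omega), (show ¬ n < 710 by omega), (show n < 740 by omega)]
  by_cases h14 : n < 760
  · simp [pvBisectB, pvScanA, pvRangeStarts, (show ¬ n < 1 by omega), (show ¬ n < 140 by omega), (show ¬ n < 240 by omega), (show ¬ n < 280 by omega), (show ¬ n < 290 by omega), (show ¬ n < 320 by omega), (show ¬ n < 390 by omega), (show ¬ n < 460 by omega), (show ¬ n < 520 by omega), (show ¬ n < 580 by omega), (show ¬ n < 630 by omega), (show ¬ n < 680 by omega), (show ¬ n < 710 by omega), (show ¬ n < 740 by omega), (show n < 760 by omega), (show n < 780 by omega)]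
  by_cases h15 : n < 780
  · simp [pvBisectB, pvScanA, pvRangeStarts, (show ¬ n < 1 by omega), (show ¬ n < 140 by omega), (show ¬ n < 240 by omega), (show ¬ n < 280 by omega), (show ¬ n < 290 by omega), (show ¬ n < 320 by omega), (show ¬ n < 390 by omega), (show ¬ n < 460 by omega), (show ¬ n < 520 by omega), (show ¬ n < 580 by omega), (show ¬ n < 630 by omega), (show ¬ n < 680 by omega), (show ¬ n < 710 by omega), (show ¬ n < 740 by omega), (show ¬ n < 760 by omega), (show n < 780 by omega)]
  by_cases h16 : n < 800
  · simp [pvBisectB, pvScanA, pvRangeStarts, (show ¬ n < 1 by omega), (show ¬ n < 140 by omega), (show ¬ n < 240 by omega), (show ¬ n < 280 by omega), (show ¬ n < 290 by omega), (show ¬ n < 320 by omega), (show ¬ n < 390 by omega), (show ¬ n < 460 by omega), (show ¬ n < 520 by omega), (show ¬ n < 580 by omega), (show ¬ n < 630 by omega), (show ¬ n < 680 by omega), (show ¬ n < 710 by omega), (show ¬ n < 740 by omega), (show ¬ n < 760 by omega), (show ¬ n < 780 by omega), (show n < 800 by omega)]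
  simp [pvBisectB, pvScanA, pvRangeStarts, (show ¬ n < 1 by omega), (show ¬ n < 140 by omega), (show ¬ n < 240 by omega), (show ¬ n < 280 by omega), (show ¬ n < 290 by omega), (show ¬ n < 320 by omega), (show ¬ n < 390 by omega), (show ¬ n < 460 by omega), (show ¬ n < 520 by omega), (show ¬ n < 580 by omega), (show ¬ n < 630 by omega), (show ¬ n < 680 by omega), (show ¬ n < 710 by omega), (show ¬ n < 740 by omega), (show ¬ n < 760 by omega), (show ¬ n < 780 by omega), (show ¬ n < 800 by omega)]

-- ===== VERDICT (by name: the statement is the Claim_ definition above) =====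
theorem prefix_to_range_spec : Claim_equal_prefix_to_range := by
  intro s _
  unfold Spec_prefix_to_range prefix_to_range prefix_to_range_alt
  split_ifs with hE hV
  · rfl
  · rfl
  · cases h : PySem.Int.ofStr? s with
    | none => rfl
    | some n => exact pv_scan_eq_bisect n
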